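-- pv_equiv track=rewrite | github.com/suzyzz/leetcode_2022 | 1870 · Number of Substrings with All Zeroes.py | string_count
-- ===== SOURCE A (Python) =====
-- def string_count(str: str) -> int:
--     count, answer = 0, 0
--     for i in str:
--         if i == "0":
--             count += 1
--         else:
--             answer += (count + 1) * count // 2
--             count = 0
--     if count != 0:
--         answer += (count + 1) * count // 2
--     return answer
-- ===== SOURCE B (Python) =====
-- def string_count(str: str) -> int:
--     # Prefix-invariant counting: for prefix position p, key(p) = number of
--     # non-'0' chars before p.  s[i:j] (i < j) is all zeros iff key(i) == key(j),
--     # so the answer is sum over key-groups of C(m, 2).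
--     counts = {0: 1}
--     key = 0
--     for ch in str:
--         if ch != "0":
--             key += 1
--         counts[key] = counts.get(key, 0) + 1
--     return sum(m * (m - 1) // 2 for m in counts.values())
-- ===== Notes on version B (the rewrite author's own statement) =====
-- stated objective: alternative
-- what changed: B replaces A's run-tracking scan (triangular number per maximal zero run plus post-loop flush) with prefix-invariant counting: it groups the n+1 prefix positions by the number of non-zero characters before them in a dict and returns the sum of C(m,2) over group sizes, since a substring is all zeros iff its two endpoints share that invariant.
import Mathlib
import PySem

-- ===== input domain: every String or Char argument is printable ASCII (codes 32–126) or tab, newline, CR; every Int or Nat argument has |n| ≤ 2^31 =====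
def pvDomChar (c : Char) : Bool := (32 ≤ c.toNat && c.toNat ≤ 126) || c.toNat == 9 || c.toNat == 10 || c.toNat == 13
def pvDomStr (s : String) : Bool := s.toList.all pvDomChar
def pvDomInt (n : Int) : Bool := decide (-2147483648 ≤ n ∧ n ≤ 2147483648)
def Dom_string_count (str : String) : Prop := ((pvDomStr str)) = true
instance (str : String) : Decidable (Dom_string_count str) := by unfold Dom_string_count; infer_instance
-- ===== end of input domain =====

-- B counts all-zero substrings by grouping prefix positions by the number of non-zero chars before them (a dict) and summing C(m,2) per group, instead of A's run-tracking scan; objective: alternative.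


-- ===== PORT A =====
-- A's loop body, state (count, answer); '//' ported with PySem.Int.floordiv
def pvStepA (s : Int × Int) (i : Char) : Int × Int :=
  if i = '0' then (s.1 + 1, s.2)
  else (0, s.2 + PySem.Int.floordiv ((s.1 + 1) * s.1) 2)

def string_count (str : String) : Int :=
  let st := str.toList.foldl pvStepA (0, 0)
  if st.1 ≠ 0 then st.2 + PySem.Int.floordiv ((st.1 + 1) * st.1) 2 else st.2

-- ===== PORT B =====
-- B's loop body, state (counts : dict, key); 'counts.get(key, 0)' = Dict.getD, 'counts[key] = …' = Dict.insert
def pvStepB (s : PySem.Dict Int Int × Int) (ch : Char) : PySem.Dict Int Int × Int :=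
  let key := if ch ≠ '0' then s.2 + 1 else s.2
  (s.1.insert key (s.1.getD key 0 + 1), key)

def string_count_alt (str : String) : Int :=
  let st := str.toList.foldl pvStepB (PySem.Dict.mk [((0 : Int), (1 : Int))], 0)
  (st.1.values.map (fun m => PySem.Int.floordiv (m * (m - 1)) 2)).sum

-- ===== PRECONDITION & SPEC =====
def Spec_string_count (str : String) (out : Int) : Prop := out = string_count_alt str
instance (str : String) (out : Int) : Decidable (Spec_string_count str out) := by unfold Spec_string_count; infer_instance

-- ===== CLAIM (what is proved, stated in full; the proofs are below) =====
def Claim_equal_string_count : Prop := ∀ (str : String), Dom_string_count str → Spec_string_count str (string_count str)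

-- ===== LEMMAS AND PROOFS =====

-- C(m,2) = m(m-1)//2, the group contribution in B
def pvC (m : Int) : Int := PySem.Int.floordiv (m * (m - 1)) 2

-- sum of group contributions over an association list's values
def pvSumC (L : List (Int × Int)) : Int := (L.map (fun p => pvC p.2)).sum

lemma pvSumC_append (L₁ L₂ : List (Int × Int)) :
    pvSumC (L₁ ++ L₂) = pvSumC L₁ + pvSumC L₂ := by
  simp [pvSumC]

-- A's per-run term for a run of length c equals C(c+1,2)
lemma pvC_succ_eq (c : Int) :
    pvC (c + 1) = PySem.Int.floordiv ((c + 1) * c) 2 := by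
  unfold pvC
  norm_num

-- B's step on a dict 'finished groups L (keys < key) ++ live group (key, c+1)'
lemma pvStepB_zero (L : List (Int × Int)) (key c : Int)
    (hL : ∀ p ∈ L, p.1 < key) :
    pvStepB (PySem.Dict.mk (L ++ [(key, c + 1)]), key) '0'
      = (PySem.Dict.mk (L ++ [(key, c + 1 + 1)]), key) := by
  have hfind : List.find? (fun p => p.1 == key) L = none := by
    rw [List.find?_eq_none]
    intro p hp
    simpa using (ne_of_lt (hL p hp))
  have hget : (PySem.Dict.mk (L ++ [(key, c + 1)])).getD key 0 = c + 1 := by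
    simp only [PySem.Dict.getD, PySem.Dict.get?]
    rw [List.find?_append, hfind]
    simp
  have hcon : (L ++ [(key, c + 1)]).any (fun p => p.1 == key) = true := by simp
  simp only [pvStepB, ne_eq, not_true_eq_false, if_false, hget,
    PySem.Dict.insert, PySem.Dict.contains, hcon, if_true]
  have hmap : L.map (fun p => if p.1 = key then (key, c + 1 + 1) else p) = L := by
    rw [show L = L.map id from (List.map_id L).symm]
    simp only [List.map_map]
    apply List.map_congr_left
    intro p hp
    have := ne_of_lt (hL p hp)
    simp [this]
  simp [hmap]

lemma pvStepB_nonzero (L : List (Int × Int)) (key c : Int) (x : Char)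
    (hx : ¬ x = '0') (hL : ∀ p ∈ L, p.1 < key) :
    pvStepB (PySem.Dict.mk (L ++ [(key, c + 1)]), key) x
      = (PySem.Dict.mk ((L ++ [(key, c + 1)]) ++ [(key + 1, 0 + 1)]), key + 1) := by
  have hnomem : ∀ p ∈ L ++ [(key, c + 1)], ¬ p.1 = key + 1 := by
    intro p hp
    rcases List.mem_append.mp hp with h | h
    · have := hL p h; omega
    · simp at h; subst h; simp
  have hget : (PySem.Dict.mk (L ++ [(key, c + 1)])).getD (key + 1) 0 = 0 := by
    have hfind : List.find? (fun p => p.1 == key + 1) (L ++ [(key, c + 1)]) = none := by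
      rw [List.find?_eq_none]
      intro p hp
      simpa using hnomem p hp
    simp [PySem.Dict.getD, PySem.Dict.get?, hfind]
  have hcon : (L ++ [(key, c + 1)]).any (fun p => p.1 == key + 1) = false := by
    rw [List.any_eq_false]
    intro p hp
    simpa using hnomem p hp
  simp only [pvStepB, ne_eq, hx, not_false_eq_true, if_true, hget,
    PySem.Dict.insert, PySem.Dict.contains, hcon]
  simp

-- main invariant: running B's loop from finished groups L (all keys < key) plus
-- the live group (key, c+1) matches running A's loop from run length c, answer a
lemma pv_loop (l : List Char) (L : List (Int × Int)) (key c a : Int)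
    (hL : ∀ p ∈ L, p.1 < key) :
    let sa := l.foldl pvStepA (c, a)
    let sb := l.foldl pvStepB (PySem.Dict.mk (L ++ [(key, c + 1)]), key)
    ∃ L', sb.1.items = L' ++ [(sb.2, sa.1 + 1)] ∧
      pvSumC L' = pvSumC L + (sa.2 - a) := by
  induction l generalizing L key c a with
  | nil => exact ⟨L, rfl, by simp⟩
  | cons x xs ih =>
    simp only [List.foldl_cons]
    by_cases hx : x = '0'
    · subst hx
      have hA : pvStepA (c, a) '0' = (c + 1, a) := by simp [pvStepA]
      rw [hA, pvStepB_zero L key c hL]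
      exact ih L key (c + 1) a hL
    · have hA : pvStepA (c, a) x = (0, a + PySem.Int.floordiv ((c + 1) * c) 2) := by
        simp [pvStepA, hx]
      rw [hA, pvStepB_nonzero L key c x hx hL]
      obtain ⟨L', h1, h2⟩ := ih (L ++ [(key, c + 1)]) (key + 1) 0
        (a + PySem.Int.floordiv ((c + 1) * c) 2)
        (by intro p hp
            rcases List.mem_append.mp hp with h | h
            · have := hL p h; omega
            · simp at h; subst h; simp)
      refine ⟨L', h1, ?_⟩
      rw [h2, pvSumC_append]
      have hone : pvSumC [(key, c + 1)] = pvC (c + 1) := by simp [pvSumC]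
      rw [hone, pvC_succ_eq]
      ring

-- ===== VERDICT (by name: the statement is the Claim_ definition above) =====
theorem string_count_spec : Claim_equal_string_count := by
  intro str _
  unfold Spec_string_count string_count string_count_alt
  obtain ⟨L', h1, h2⟩ := pv_loop str.toList [] 0 0 0 (by simp)
  simp only [List.nil_append] at h1 h2
  norm_num at h1 h2
  simp only [PySem.Dict.values]
  rw [h1]
  simp only [List.map_append, List.sum_append, List.map_cons, List.map_nil, List.map_map]
  have hsum : (L'.map ((fun m => PySem.Int.floordiv (m * (m - 1)) 2) ∘ (fun p => p.2))).sum
      = pvSumC L' := by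
    simp [pvSumC, pvC, Function.comp_def]
  rw [hsum, h2]
  set sa := str.toList.foldl pvStepA (0, 0) with hsa
  have hlast : PySem.Int.floordiv ((sa.1 + 1) * (sa.1 + 1 - 1)) 2
      = PySem.Int.floordiv ((sa.1 + 1) * sa.1) 2 := by norm_num
  split_ifs with hne
  · simp only [List.sum_cons, List.sum_nil, hlast]
    simp [pvSumC]
  · push Not at hne
    simp [hne, pvSumC, PySem.Int.floordiv]
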